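-- pv_equiv track=rewrite | github.com/thaReal/MasterChef | codejam/2020/1A/pattern.py | solve
-- ===== SOURCE A (Python) =====
-- def solve(p):
-- 	lens1 = [len(pi[0]) for pi in p]
-- 	lens2 = [len(pi[1]) for pi in p]
--
-- 	mx_len1 = lens1.index(max(lens1))
-- 	mx_len2 = lens2.index(max(lens2))
--
-- 	mx1 = p[mx_len1][0]
-- 	mx2 = p[mx_len2][1]
--
-- 	# first list
-- 	for pi in p:
-- 		if mx1 == pi[0]:
-- 			continue
--
-- 		idx = len(pi[0])
-- 		if mx1[:idx] == pi[0]: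
-- 			continue
-- 		else:
-- 			return '*'
--
-- 	# second list
-- 	for pi in p:
-- 		if mx2 == pi[1]:
-- 			continue
--
-- 		idx = len(mx2) - len(pi[1])
-- 		if mx2[idx:] == pi[1]:
-- 			continue
-- 		else:
-- 			return '*'
--
-- 	return mx1 + mx2
-- ===== SOURCE B (Python) =====
-- def solve(p):
--     # single fold per coordinate: maintain running longest prefix / suffix
--     a = p[0][0]
--     for s, _ in p:
--         if len(s) > len(a):
--             if not s.startswith(a):
--                 return '*'
--             a = s
--         elif not a.startswith(s):
--             return '*'
--     b = p[0][1]
--     for _, s in p: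
--         if len(s) > len(b):
--             if not s.endswith(b):
--                 return '*'
--             b = s
--         elif not b.endswith(s):
--             return '*'
--     return a + b
-- ===== Notes on version B (the rewrite author's own statement) =====
-- stated objective: alternative
-- what changed: Replaces A's two argmax passes (max over lengths + list.index) followed by verify-all passes with a single fold per coordinate that maintains the running longest prefix/suffix and fails on the first incomparable pair.
import Mathlib
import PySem

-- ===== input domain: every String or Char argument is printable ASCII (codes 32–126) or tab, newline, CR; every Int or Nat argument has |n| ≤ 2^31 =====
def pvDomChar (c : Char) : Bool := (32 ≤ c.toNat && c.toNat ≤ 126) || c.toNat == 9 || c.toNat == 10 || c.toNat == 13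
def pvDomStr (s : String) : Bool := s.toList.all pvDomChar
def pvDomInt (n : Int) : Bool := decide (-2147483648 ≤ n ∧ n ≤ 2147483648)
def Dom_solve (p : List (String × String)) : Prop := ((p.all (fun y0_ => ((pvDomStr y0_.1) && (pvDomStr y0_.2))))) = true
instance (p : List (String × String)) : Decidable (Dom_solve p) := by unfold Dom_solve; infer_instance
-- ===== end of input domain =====

-- B replaces A's argmax-then-verify structure with one fold per coordinate that
-- maintains the running longest prefix/suffix; same cost, different decomposition.


-- ===== PORT A =====
-- mx1 = p[lens1.index(max(lens1))][0]  (the '' branch is Python's ValueError on empty p, excluded by Pre_solve)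
def solveMx1 (p : List (String × String)) : String :=
  let lens1 := p.map (fun pi => PySem.Str.len pi.1)
  match PySem.List.max? lens1 (fun x => x) with
  | none => ""
  | some m =>
      (((PySem.List.pyGet? p ((((PySem.List.index? lens1 m).getD 0 : Nat)) : Int)).getD ("", ""))).1

-- mx2 = p[lens2.index(max(lens2))][1]
def solveMx2 (p : List (String × String)) : String :=
  let lens2 := p.map (fun pi => PySem.Str.len pi.2)
  match PySem.List.max? lens2 (fun x => x) with
  | none => ""
  | some m =>
      (((PySem.List.pyGet? p ((((PySem.List.index? lens2 m).getD 0 : Nat)) : Int)).getD ("", ""))).2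

-- first loop of A: false = 'return "*"'
def solveLoop1 (mx1 : String) : List (String × String) → Bool
  | [] => true
  | pi :: rest =>
      if mx1 == pi.1 then solveLoop1 mx1 rest
      else if PySem.Str.slice mx1 none (some (PySem.Str.len pi.1)) == pi.1 then
        solveLoop1 mx1 rest
      else false

-- second loop of A
def solveLoop2 (mx2 : String) : List (String × String) → Bool
  | [] => true
  | pi :: rest =>
      if mx2 == pi.2 then solveLoop2 mx2 rest
      else if PySem.Str.slice mx2 (some (PySem.Str.len mx2 - PySem.Str.len pi.2)) none == pi.2 then
        solveLoop2 mx2 rest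
      else false

def solve (p : List (String × String)) : String :=
  let mx1 := solveMx1 p
  let mx2 := solveMx2 p
  if solveLoop1 mx1 p then
    if solveLoop2 mx2 p then String.ofList (mx1.toList ++ mx2.toList) else "*"
  else "*"

-- ===== PORT B =====
-- fold keeping the running longest prefix; none = 'return "*"'
def altPrefixFold (a : String) : List (String × String) → Option String
  | [] => some a
  | pi :: rest =>
      if PySem.Str.len pi.1 > PySem.Str.len a then
        if PySem.Str.startswith pi.1 a then altPrefixFold pi.1 rest else none
      else
        if PySem.Str.startswith a pi.1 then altPrefixFold a rest else none

-- fold keeping the running longest suffix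
def altSuffixFold (b : String) : List (String × String) → Option String
  | [] => some b
  | pi :: rest =>
      if PySem.Str.len pi.2 > PySem.Str.len b then
        if PySem.Str.endswith pi.2 b then altSuffixFold pi.2 rest else none
      else
        if PySem.Str.endswith b pi.2 then altSuffixFold b rest else none

def solve_alt (p : List (String × String)) : String :=
  match p with
  | [] => ""   -- Python B: IndexError on p[0]; excluded by Pre_solve
  | p0 :: _ =>
      match altPrefixFold p0.1 p with
      | none => "*"
      | some a =>
          match altSuffixFold p0.2 p with
          | none => "*"
          | some b => String.ofList (a.toList ++ b.toList)

-- ===== PRECONDITION & SPEC =====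
-- Pre_ excludes only the empty list, on which Python A raises ValueError (max of empty sequence).
def Pre_solve (p : List (String × String)) : Prop := p ≠ []
instance (p : List (String × String)) : Decidable (Pre_solve p) := by unfold Pre_solve; infer_instance
def pvWitness_solve : (List (String × String)) := [("ab", "cd"), ("a", "d")]

def Spec_solve (p : List (String × String)) (out : String) : Prop := out = solve_alt p
instance (p : List (String × String)) (out : String) : Decidable (Spec_solve p out) := by unfold Spec_solve; infer_instance

-- ===== CLAIM (what is proved, stated in full; the proofs are below) =====
def Claim_equal_solve : Prop := ∀ (p : List (String × String)), Dom_solve p → Pre_solve p → Spec_solve p (solve p)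

-- ===== LEMMAS AND PROOFS =====

-- A's slice test 'mx1[:len(x)] == x' says exactly 'x is a prefix of m'
lemma slice_prefix_iff (m x : String) :
    (PySem.Str.slice m none (some (PySem.Str.len x)) = x) ↔ x.toList <+: m.toList := by
  rw [← String.toList_inj, List.prefix_iff_eq_take]
  simp [pysem, PySem.List.slice_to_natCast]
  exact eq_comm

-- A's slice test 'mx2[len(mx2)-len(x):] == x' says exactly 'x is a suffix of m'
lemma slice_suffix_iff (m x : String) :
    (PySem.Str.slice m (some (PySem.Str.len m - PySem.Str.len x)) none = x) ↔ x.toList <:+ m.toList := by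
  rw [← String.toList_inj]
  by_cases hle : x.toList.length ≤ m.toList.length
  · have hle' : x.length ≤ m.length := by simpa [String.length_toList] using hle
    have hcast : PySem.Str.len m - PySem.Str.len x = ((m.toList.length - x.toList.length : Nat) : Int) := by
      simp [pysem, String.length_toList]; omega
    rw [List.suffix_iff_eq_drop, hcast]
    simp [pysem, PySem.List.slice_from_natCast]
    exact eq_comm
  · constructor
    · intro h
      exfalso
      have hlen : (PySem.Str.slice m (some (PySem.Str.len m - PySem.Str.len x)) none).toList.length ≤ m.toList.length := by
        simp [pysem, PySem.List.slice_some_none]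
      rw [h] at hlen; omega
    · intro h
      exact absurd h.length_le hle

-- A's first loop succeeds iff every first component is a prefix of m
lemma loop1_iff (m : String) (l : List (String × String)) :
    solveLoop1 m l = true ↔ ∀ pi ∈ l, pi.1.toList <+: m.toList := by
  induction l with
  | nil => simp [solveLoop1]
  | cons pi rest ih =>
    rcases eq_or_ne m pi.1 with he | hne
    · simp [solveLoop1, ← he, ih]
    · by_cases hc : pi.1.toList <+: m.toList
      · have hs := (slice_prefix_iff m pi.1).mpr hc
        simp only [pysem, String.length_toList] at hs
        simp [solveLoop1, hne, hs, ih, hc]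
      · have hs : PySem.Str.slice m none (some (PySem.Str.len pi.1)) ≠ pi.1 := by
          intro h; exact hc ((slice_prefix_iff m pi.1).mp h)
        simp only [pysem, ne_eq, String.length_toList] at hs
        simp [solveLoop1, hne, hs, hc]

-- A's second loop succeeds iff every second component is a suffix of m
lemma loop2_iff (m : String) (l : List (String × String)) :
    solveLoop2 m l = true ↔ ∀ pi ∈ l, pi.2.toList <:+ m.toList := by
  induction l with
  | nil => simp [solveLoop2]
  | cons pi rest ih =>
    rcases eq_or_ne m pi.2 with he | hne
    · simp [solveLoop2, ← he, ih]
    · by_cases hc : pi.2.toList <:+ m.toList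
      · have hs := (slice_suffix_iff m pi.2).mpr hc
        simp only [pysem, String.length_toList] at hs
        simp [solveLoop2, hne, hs, ih, hc]
      · have hs : PySem.Str.slice m (some (PySem.Str.len m - PySem.Str.len pi.2)) none ≠ pi.2 := by
          intro h; exact hc ((slice_suffix_iff m pi.2).mp h)
        simp only [pysem, ne_eq, String.length_toList] at hs
        simp [solveLoop2, hne, hs, hc]

-- A's argmax computation: solveMx1 p is a first component of maximal length
lemma mx1_spec (p : List (String × String)) (h : p ≠ []) :
    (∃ q ∈ p, solveMx1 p = q.1) ∧ ∀ pi ∈ p, pi.1.toList.length ≤ (solveMx1 p).toList.length := by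
  obtain ⟨m, hm⟩ : ∃ m, PySem.List.max? (p.map fun pi => PySem.Str.len pi.1) (fun x => x) = some m := by
    cases hmx : PySem.List.max? (p.map fun pi => PySem.Str.len pi.1) (fun x => x) with
    | none =>
        rw [PySem.List.max?_eq_none_iff] at hmx
        exact absurd (by simpa using hmx) h
    | some m => exact ⟨m, rfl⟩
  have hmem := PySem.List.max?_mem hm
  have hmax := PySem.List.max?_isMax hm
  obtain ⟨i, hi⟩ : ∃ i, PySem.List.index? (p.map fun pi => PySem.Str.len pi.1) m = some i := by
    have h' := hmem
    rw [← PySem.List.index?_isSome_iff] at h'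
    exact Option.isSome_iff_exists.mp h'
  obtain ⟨hk, hget, -⟩ := PySem.List.getElem_of_index?_eq_some hi
  have hkp : i < p.length := by simpa using hk
  have hsolve : solveMx1 p = (p[i]'hkp).1 := by
    simp only [solveMx1, hm, hi, Option.getD_some]
    simp [PySem.List.pyGet?_natCast, List.getElem?_eq_getElem hkp]
  refine ⟨⟨p[i]'hkp, List.getElem_mem hkp, hsolve⟩, ?_⟩
  intro pi hpi
  have h1 : PySem.Str.len pi.1 ≤ m := hmax _ (List.mem_map_of_mem hpi)
  have h2 : m = PySem.Str.len (p[i]'hkp).1 := by rw [← hget]; simp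
  rw [hsolve]
  simp [pysem, String.length_toList] at h1 h2 ⊢
  omega

lemma mx2_spec (p : List (String × String)) (h : p ≠ []) :
    (∃ q ∈ p, solveMx2 p = q.2) ∧ ∀ pi ∈ p, pi.2.toList.length ≤ (solveMx2 p).toList.length := by
  obtain ⟨m, hm⟩ : ∃ m, PySem.List.max? (p.map fun pi => PySem.Str.len pi.2) (fun x => x) = some m := by
    cases hmx : PySem.List.max? (p.map fun pi => PySem.Str.len pi.2) (fun x => x) with
    | none =>
        rw [PySem.List.max?_eq_none_iff] at hmx
        exact absurd (by simpa using hmx) h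
    | some m => exact ⟨m, rfl⟩
  have hmem := PySem.List.max?_mem hm
  have hmax := PySem.List.max?_isMax hm
  obtain ⟨i, hi⟩ : ∃ i, PySem.List.index? (p.map fun pi => PySem.Str.len pi.2) m = some i := by
    have h' := hmem
    rw [← PySem.List.index?_isSome_iff] at h'
    exact Option.isSome_iff_exists.mp h'
  obtain ⟨hk, hget, -⟩ := PySem.List.getElem_of_index?_eq_some hi
  have hkp : i < p.length := by simpa using hk
  have hsolve : solveMx2 p = (p[i]'hkp).2 := by
    simp only [solveMx2, hm, hi, Option.getD_some]
    simp [PySem.List.pyGet?_natCast, List.getElem?_eq_getElem hkp]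
  refine ⟨⟨p[i]'hkp, List.getElem_mem hkp, hsolve⟩, ?_⟩
  intro pi hpi
  have h1 : PySem.Str.len pi.2 ≤ m := hmax _ (List.mem_map_of_mem hpi)
  have h2 : m = PySem.Str.len (p[i]'hkp).2 := by rw [← hget]; simp
  rw [hsolve]
  simp [pysem, String.length_toList] at h1 h2 ⊢
  omega

-- B's prefix fold: whatever it returns is an encountered string that everything seen prefixes
lemma pf_forward (l : List (String × String)) (a r : String) (h : altPrefixFold a l = some r) :
    (r = a ∨ ∃ pi ∈ l, r = pi.1) ∧ a.toList <+: r.toList ∧ ∀ pi ∈ l, pi.1.toList <+: r.toList := by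
  induction l generalizing a with
  | nil =>
    simp [altPrefixFold] at h
    simp [h]
  | cons pi rest ih =>
    rw [altPrefixFold] at h
    split_ifs at h with h1 h2 h3
    · obtain ⟨hmem, hpre, hall⟩ := ih pi.1 h
      have hap : a.toList <+: pi.1.toList := by
        simpa [pysem, PySem.Chars.startswith_iff] using h2
      refine ⟨?_, hap.trans hpre, ?_⟩
      · rcases hmem with h' | ⟨qi, hqi, h'⟩
        · exact Or.inr ⟨pi, by simp, h'⟩
        · exact Or.inr ⟨qi, by simp [hqi], h'⟩
      · intro qi hqi
        rcases List.mem_cons.mp hqi with rfl | hqi'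
        · exact hpre
        · exact hall qi hqi'
    · obtain ⟨hmem, hpre, hall⟩ := ih a h
      have hpa : pi.1.toList <+: a.toList := by
        simpa [pysem, PySem.Chars.startswith_iff] using h3
      refine ⟨?_, hpre, ?_⟩
      · rcases hmem with h' | ⟨qi, hqi, h'⟩
        · exact Or.inl h'
        · exact Or.inr ⟨qi, by simp [hqi], h'⟩
      · intro qi hqi
        rcases List.mem_cons.mp hqi with rfl | hqi'
        · exact hpa.trans hpre
        · exact hall qi hqi'

-- B's prefix fold never fails when everything is a prefix of a common string
lemma pf_total (l : List (String × String)) (a : String) (z : List Char)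
    (ha : a.toList <+: z) (hl : ∀ pi ∈ l, pi.1.toList <+: z) :
    ∃ r, altPrefixFold a l = some r := by
  induction l generalizing a with
  | nil => exact ⟨a, rfl⟩
  | cons pi rest ih =>
    have hpi := hl pi (by simp)
    have hrest : ∀ qi ∈ rest, qi.1.toList <+: z := fun qi hqi => hl qi (by simp [hqi])
    rw [altPrefixFold]
    by_cases h1 : PySem.Str.len pi.1 > PySem.Str.len a
    · have hap : a.toList <+: pi.1.toList := by
        rcases List.prefix_or_prefix_of_prefix ha hpi with h' | h'
        · exact h'
        · have : pi.1.toList.length ≤ a.toList.length := h'.length_le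
          simp [pysem, -String.length_toList] at h1; omega
      have hsw : PySem.Str.startswith pi.1 a = true := by
        simpa [pysem, PySem.Chars.startswith_iff] using hap
      simp only [h1, if_true, hsw]
      exact ih pi.1 hpi hrest
    · have hpa : pi.1.toList <+: a.toList := by
        rcases List.prefix_or_prefix_of_prefix hpi ha with h' | h'
        · exact h'
        · have hle : pi.1.toList.length ≤ a.toList.length := by
            simp [pysem, -String.length_toList] at h1; omega
          rw [h'.eq_of_length_le hle]
      have hsw : PySem.Str.startswith a pi.1 = true := by
        simpa [pysem, PySem.Chars.startswith_iff] using hpa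
      simp only [h1, if_false, hsw, if_true]
      exact ih a ha hrest

-- suffix-side twins of the two fold lemmas
lemma sf_forward (l : List (String × String)) (b r : String) (h : altSuffixFold b l = some r) :
    (r = b ∨ ∃ pi ∈ l, r = pi.2) ∧ b.toList <:+ r.toList ∧ ∀ pi ∈ l, pi.2.toList <:+ r.toList := by
  induction l generalizing b with
  | nil =>
    simp [altSuffixFold] at h
    simp [h]
  | cons pi rest ih =>
    rw [altSuffixFold] at h
    split_ifs at h with h1 h2 h3
    · obtain ⟨hmem, hpre, hall⟩ := ih pi.2 h
      have hap : b.toList <:+ pi.2.toList := by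
        simpa [pysem, PySem.Chars.endswith_iff] using h2
      refine ⟨?_, hap.trans hpre, ?_⟩
      · rcases hmem with h' | ⟨qi, hqi, h'⟩
        · exact Or.inr ⟨pi, by simp, h'⟩
        · exact Or.inr ⟨qi, by simp [hqi], h'⟩
      · intro qi hqi
        rcases List.mem_cons.mp hqi with rfl | hqi'
        · exact hpre
        · exact hall qi hqi'
    · obtain ⟨hmem, hpre, hall⟩ := ih b h
      have hpa : pi.2.toList <:+ b.toList := by
        simpa [pysem, PySem.Chars.endswith_iff] using h3
      refine ⟨?_, hpre, ?_⟩
      · rcases hmem with h' | ⟨qi, hqi, h'⟩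
        · exact Or.inl h'
        · exact Or.inr ⟨qi, by simp [hqi], h'⟩
      · intro qi hqi
        rcases List.mem_cons.mp hqi with rfl | hqi'
        · exact hpa.trans hpre
        · exact hall qi hqi'

lemma sf_total (l : List (String × String)) (b : String) (z : List Char)
    (hb : b.toList <:+ z) (hl : ∀ pi ∈ l, pi.2.toList <:+ z) :
    ∃ r, altSuffixFold b l = some r := by
  induction l generalizing b with
  | nil => exact ⟨b, rfl⟩
  | cons pi rest ih =>
    have hpi := hl pi (by simp)
    have hrest : ∀ qi ∈ rest, qi.2.toList <:+ z := fun qi hqi => hl qi (by simp [hqi])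
    rw [altSuffixFold]
    by_cases h1 : PySem.Str.len pi.2 > PySem.Str.len b
    · have hap : b.toList <:+ pi.2.toList := by
        rcases List.suffix_or_suffix_of_suffix hb hpi with h' | h'
        · exact h'
        · have : pi.2.toList.length ≤ b.toList.length := h'.length_le
          simp [pysem, -String.length_toList] at h1; omega
      have hsw : PySem.Str.endswith pi.2 b = true := by
        simpa [pysem, PySem.Chars.endswith_iff] using hap
      simp only [h1, if_true, hsw]
      exact ih pi.2 hpi hrest
    · have hpa : pi.2.toList <:+ b.toList := by
        rcases List.suffix_or_suffix_of_suffix hpi hb with h' | h'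
        · exact h'
        · have hle : pi.2.toList.length ≤ b.toList.length := by
            simp [pysem, -String.length_toList] at h1; omega
          rw [h'.eq_of_length_le hle]
      have hsw : PySem.Str.endswith b pi.2 = true := by
        simpa [pysem, PySem.Chars.endswith_iff] using hpa
      simp only [h1, if_false, hsw, if_true]
      exact ih b hb hrest

-- combined: B's prefix fold, started anywhere in p, returns exactly A's argmax when
-- the first components form a prefix chain, and none when they do not
lemma pf_eval (p : List (String × String)) (p0 : String × String) (h0 : p0 ∈ p) (h : p ≠ []) :
    altPrefixFold p0.1 p = (if ∀ pi ∈ p, pi.1.toList <+: (solveMx1 p).toList then some (solveMx1 p) else none) := by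
  obtain ⟨⟨q, hq, hqe⟩, hmax⟩ := mx1_spec p h
  by_cases hc : ∀ pi ∈ p, pi.1.toList <+: (solveMx1 p).toList
  · obtain ⟨r, hr⟩ := pf_total p p0.1 (solveMx1 p).toList (hc p0 h0) hc
    obtain ⟨hmem, -, hall⟩ := pf_forward p p0.1 r hr
    have hrmem : ∃ qi ∈ p, r = qi.1 := by
      rcases hmem with h' | h'
      · exact ⟨p0, h0, h'⟩
      · exact h'
    obtain ⟨qi, hqi, rfl⟩ := hrmem
    have h1 : (solveMx1 p).toList <+: qi.1.toList := by
      rw [hqe]; exact hall q hq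
    have h2 : qi.1.toList.length ≤ (solveMx1 p).toList.length := hmax qi hqi
    have : (solveMx1 p).toList = qi.1.toList := h1.eq_of_length_le h2
    rw [hr, if_pos hc, String.toList_inj.mp this]
  · rw [if_neg hc]
    cases hr : altPrefixFold p0.1 p with
    | none => rfl
    | some r =>
      exfalso
      obtain ⟨hmem, -, hall⟩ := pf_forward p p0.1 r hr
      have hrmem : ∃ qi ∈ p, r = qi.1 := by
        rcases hmem with h' | h'
        · exact ⟨p0, h0, h'⟩
        · exact h'
      obtain ⟨qi, hqi, rfl⟩ := hrmem
      have h1 : (solveMx1 p).toList <+: qi.1.toList := by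
        rw [hqe]; exact hall q hq
      have heq : (solveMx1 p).toList = qi.1.toList := h1.eq_of_length_le (hmax qi hqi)
      exact hc (fun pi hpi => heq ▸ hall pi hpi)

lemma sf_eval (p : List (String × String)) (p0 : String × String) (h0 : p0 ∈ p) (h : p ≠ []) :
    altSuffixFold p0.2 p = (if ∀ pi ∈ p, pi.2.toList <:+ (solveMx2 p).toList then some (solveMx2 p) else none) := by
  obtain ⟨⟨q, hq, hqe⟩, hmax⟩ := mx2_spec p h
  by_cases hc : ∀ pi ∈ p, pi.2.toList <:+ (solveMx2 p).toList
  · obtain ⟨r, hr⟩ := sf_total p p0.2 (solveMx2 p).toList (hc p0 h0) hc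
    obtain ⟨hmem, -, hall⟩ := sf_forward p p0.2 r hr
    have hrmem : ∃ qi ∈ p, r = qi.2 := by
      rcases hmem with h' | h'
      · exact ⟨p0, h0, h'⟩
      · exact h'
    obtain ⟨qi, hqi, rfl⟩ := hrmem
    have h1 : (solveMx2 p).toList <:+ qi.2.toList := by
      rw [hqe]; exact hall q hq
    have : (solveMx2 p).toList = qi.2.toList := h1.eq_of_length_le (hmax qi hqi)
    rw [hr, if_pos hc, String.toList_inj.mp this]
  · rw [if_neg hc]
    cases hr : altSuffixFold p0.2 p with
    | none => rfl
    | some r =>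
      exfalso
      obtain ⟨hmem, -, hall⟩ := sf_forward p p0.2 r hr
      have hrmem : ∃ qi ∈ p, r = qi.2 := by
        rcases hmem with h' | h'
        · exact ⟨p0, h0, h'⟩
        · exact h'
      obtain ⟨qi, hqi, rfl⟩ := hrmem
      have h1 : (solveMx2 p).toList <:+ qi.2.toList := by
        rw [hqe]; exact hall q hq
      have heq : (solveMx2 p).toList = qi.2.toList := h1.eq_of_length_le (hmax qi hqi)
      exact hc (fun pi hpi => heq ▸ hall pi hpi)

-- ===== VERDICT (by name: the statement is the Claim_ definition above) =====
theorem solve_spec : Claim_equal_solve := by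
  intro p _ hpre
  unfold Spec_solve
  obtain ⟨p0, rest, rfl⟩ : ∃ p0 rest, p = p0 :: rest := by
    cases p with
    | nil => exact absurd rfl hpre
    | cons a l => exact ⟨a, l, rfl⟩
  rw [solve_alt, pf_eval (p0 :: rest) p0 (by simp) hpre, sf_eval (p0 :: rest) p0 (by simp) hpre]
  by_cases hc1 : ∀ pi ∈ p0 :: rest, pi.1.toList <+: (solveMx1 (p0 :: rest)).toList
  · by_cases hc2 : ∀ pi ∈ p0 :: rest, pi.2.toList <:+ (solveMx2 (p0 :: rest)).toList
    · rw [if_pos hc1, if_pos hc2]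
      rw [solve]
      rw [if_pos ((loop1_iff _ _).mpr hc1), if_pos ((loop2_iff _ _).mpr hc2)]
    · rw [if_pos hc1, if_neg hc2]
      rw [solve]
      rw [if_pos ((loop1_iff _ _).mpr hc1),
        if_neg (by intro h; exact hc2 ((loop2_iff _ _).mp h))]
  · rw [if_neg hc1]
    rw [solve]
    rw [if_neg (by intro h; exact hc1 ((loop1_iff _ _).mp h))]
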